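-- pv_equiv track=rewrite | github.com/LorenzHW/Coding-Competitions | kickstart/practice_session/mural/mural.py | solve
-- ===== SOURCE A (Python) =====
-- def solve(N, A):
--     # print "Input:", N, A
--     B = [0] * (N + 1)
--     for i in range(1, N + 1):
--         B[i] = B[i - 1] + A[i - 1]
--     res = 0
--     half = (N + 1) // 2
--     for i in range(N):
--         if i + half <= N:
--             res = max(res, B[i + half] - B[i])
--     return res
-- ===== SOURCE B (Python) =====
-- def solve(N, A):
--     if N <= 0:
--         return 0
--     half = (N + 1) // 2
--     s = sum(A[:half])
--     res = max(0, s)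
--     for i in range(1, N - half + 1):
--         s += A[i + half - 1] - A[i - 1]
--         if s > res:
--             res = s
--     return res
-- ===== Notes on version B (the rewrite author's own statement) =====
-- stated objective: simpler
-- what changed: Replaced the (N+1)-entry prefix-sum array plus a guarded scan over all N starts with a single O(1)-space sliding window: one running window sum updated by subtracting the element leaving and adding the element entering.
import Mathlib
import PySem

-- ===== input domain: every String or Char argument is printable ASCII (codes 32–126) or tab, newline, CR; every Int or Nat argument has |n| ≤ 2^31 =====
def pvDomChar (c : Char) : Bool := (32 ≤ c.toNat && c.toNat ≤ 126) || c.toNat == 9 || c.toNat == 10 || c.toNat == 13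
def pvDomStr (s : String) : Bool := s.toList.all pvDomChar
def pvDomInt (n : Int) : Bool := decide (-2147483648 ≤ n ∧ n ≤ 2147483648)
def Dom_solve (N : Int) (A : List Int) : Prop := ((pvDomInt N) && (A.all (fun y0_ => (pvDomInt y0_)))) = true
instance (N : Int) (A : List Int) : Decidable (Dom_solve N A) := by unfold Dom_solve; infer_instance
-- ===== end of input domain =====

-- B replaces A's prefix-sum array with a constant-space sliding window sum (objective: simpler).

-- ===== PORT A =====
def solve (N : Int) (A : List Int) : Int :=
  let B0 : List Int := List.replicate (N + 1).toNat 0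
  let B := (PySem.List.pyRange 1 (N + 1) 1).foldl
    (fun B i => PySem.List.pySetD B i (PySem.List.pyGetD B (i - 1) 0 + PySem.List.pyGetD A (i - 1) 0)) B0
  let half := PySem.Int.floordiv (N + 1) 2
  (PySem.List.pyRange 0 N 1).foldl
    (fun res i => if i + half ≤ N then max res (PySem.List.pyGetD B (i + half) 0 - PySem.List.pyGetD B i 0) else res) 0

-- ===== PORT B =====
def solve_alt (N : Int) (A : List Int) : Int :=
  if N ≤ 0 then 0
  else
    let half := PySem.Int.floordiv (N + 1) 2
    let s0 := (PySem.List.slice A (some 0) (some half)).sum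
    let res0 := max 0 s0
    let p := (PySem.List.pyRange 1 (N - half + 1) 1).foldl
      (fun (p : Int × Int) i =>
        let s := p.2 + PySem.List.pyGetD A (i + half - 1) 0 - PySem.List.pyGetD A (i - 1) 0
        (if s > p.1 then s else p.1, s)) (res0, s0)
    p.1

-- ===== PRECONDITION & SPEC =====

-- Pre_: exactly the inputs where the Python A returns (A raises IndexError when N > len(A)).
def Pre_solve (N : Int) (A : List Int) : Prop := N ≤ (A.length : Int)
instance (N : Int) (A : List Int) : Decidable (Pre_solve N A) := by unfold Pre_solve; infer_instance
def pvWitness_solve : Int × List Int := (3, [1, -2, 3])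

def Spec_solve (N : Int) (A : List Int) (out : Int) : Prop := out = solve_alt N A
instance (N : Int) (A : List Int) (out : Int) : Decidable (Spec_solve N A out) := by unfold Spec_solve; infer_instance

-- ===== CLAIM (what is proved, stated in full; the proofs are below) =====
def Claim_equal_solve : Prop := ∀ (N : Int) (A : List Int), Dom_solve N A → Pre_solve N A → Spec_solve N A (solve N A)


-- ===== LEMMAS AND PROOFS =====

-- prefix sums of A
def pref (A : List Int) (k : Nat) : Int := (A.take k).sum

lemma pref_zero (A : List Int) : pref A 0 = 0 := rfl

lemma pref_succ (A : List Int) (k : Nat) (hk : k < A.length) :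
    pref A (k + 1) = pref A k + A[k] := by
  unfold pref
  exact List.sum_take_succ A k hk

-- Phase 1 of A: the prefix-sum array after the first k iterations
lemma bfold (A : List Int) (n k : Nat) (hk : k ≤ n) (hn : n ≤ A.length) :
    (PySem.List.pyRange 1 ((k : Int) + 1) 1).foldl
      (fun B i => PySem.List.pySetD B i
        (PySem.List.pyGetD B (i - 1) 0 + PySem.List.pyGetD A (i - 1) 0))
      (List.replicate (n + 1) 0)
    = (List.range (k + 1)).map (pref A) ++ List.replicate (n - k) 0 := by
  induction k with
  | zero =>
    rw [PySem.List.pyRange_one_eq_nil (by simp)]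
    simp [List.replicate_succ, pref]
  | succ k ih =>
    have h1 : ((k + 1 : Nat) : Int) + 1 = ((k : Int) + 1) + 1 := by push_cast; ring
    rw [h1, PySem.List.pyRange_one_succ_right (by omega : (1:Int) ≤ (k:Int) + 1),
        List.foldl_append, ih (by omega)]
    simp only [List.foldl_cons, List.foldl_nil]
    have hkn : k < n := by omega
    have hkA : k < A.length := by omega
    have e1 : (k : Int) + 1 - 1 = ((k : Nat) : Int) := by ring
    have e2 : ((k : Int) + 1) = ((k + 1 : Nat) : Int) := by push_cast; ring
    rw [e1, e2, PySem.List.pyGetD_natCast, PySem.List.pyGetD_natCast,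
        PySem.List.pySetD_natCast]
    have hget : ((List.range (k+1)).map (pref A) ++ List.replicate (n - k) 0).getD k 0
        = pref A k := by
      rw [List.getD_eq_getElem?_getD,
          List.getElem?_append_left (by simp only [List.length_map, List.length_range]; omega)]
      simp
    have hgetA : A.getD k 0 = A[k] := by
      rw [List.getD_eq_getElem?_getD, List.getElem?_eq_getElem hkA]; rfl
    rw [hget, hgetA]
    have hrep : List.replicate (n - k) (0 : Int) = 0 :: List.replicate (n - (k+1)) 0 := by
      rw [← List.replicate_succ]; congr 1; omega
    rw [hrep, List.set_append]
    rw [if_neg (by simp)]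
    simp only [List.length_map, List.length_range, Nat.sub_self, List.set_cons_zero]
    rw [List.range_succ (n := k + 1), List.map_append, List.append_assoc]
    simp [pref_succ A k hkA]

-- the guarded max-scan of A over all n starts equals the unguarded scan over the first n-hh+1 starts
lemma afold (A : List Int) (n hh : Nat) (hh1 : 1 ≤ hh) (hhle : hh ≤ n) (r : Int) :
    (List.range n).foldl
      (fun res (t : Nat) => if (t : Int) + (hh : Int) ≤ (n : Int)
        then max res (pref A (t + hh) - pref A t) else res) r
    = (List.range (n - hh + 1)).foldl
        (fun res (t : Nat) => max res (pref A (t + hh) - pref A t)) r := by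
  rw [show List.range n = List.range (n - hh + 1) ++ (List.range (hh - 1)).map ((n - hh + 1) + ·)
      by rw [← List.range_add]; congr 1; omega]
  rw [List.foldl_append, List.foldl_map]
  have h2 : ∀ r0 : Int, (List.range (hh - 1)).foldl
      (fun x (y : Nat) => if (((n - hh + 1) + y : Nat) : Int) + (hh : Int) ≤ (n : Int)
        then max x (pref A (((n - hh + 1) + y) + hh) - pref A ((n - hh + 1) + y)) else x) r0 = r0 := by
    intro r0
    refine (PySem.List.foldl_congr_mem _ _ (fun x (_ : Nat) => x) r0 ?_).trans ?_
    · intro acc y hy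
      have := List.mem_range.mp hy
      rw [if_neg]
      push_cast; omega
    · exact PySem.List.foldl_ignore _ _
  rw [h2]
  refine PySem.List.foldl_congr_mem _ _ _ _ ?_
  intro acc t ht
  have htl := List.mem_range.mp ht
  rw [if_pos]
  omega

-- the sliding-window loop of B: running sum stays the window sum, first component the running max
lemma bloop (A : List Int) (hh : Nat) (k : Nat) (hk : k + hh ≤ A.length) (r : Int) :
    (List.range k).foldl
      (fun (p : Int × Int) (t : Nat) =>
        (if p.2 + PySem.List.pyGetD A (1 + (t : Int) + (hh : Int) - 1) 0
              - PySem.List.pyGetD A (1 + (t : Int) - 1) 0 > p.1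
         then p.2 + PySem.List.pyGetD A (1 + (t : Int) + (hh : Int) - 1) 0
              - PySem.List.pyGetD A (1 + (t : Int) - 1) 0
         else p.1,
         p.2 + PySem.List.pyGetD A (1 + (t : Int) + (hh : Int) - 1) 0
              - PySem.List.pyGetD A (1 + (t : Int) - 1) 0)) (r, pref A hh)
    = ((List.range k).foldl
        (fun res (t : Nat) => max res (pref A ((1 + t) + hh) - pref A (1 + t))) r,
       pref A (k + hh) - pref A k) := by
  induction k with
  | zero => simp [pref_zero]
  | succ k ih =>
    rw [List.range_succ, List.foldl_append, List.foldl_append, ih (by omega)]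
    simp only [List.foldl_cons, List.foldl_nil]
    have hk1 : k + hh < A.length := by omega
    have hk2 : k < A.length := by omega
    have e1 : 1 + (k : Int) + (hh : Int) - 1 = ((k + hh : Nat) : Int) := by push_cast; ring
    have e2 : 1 + (k : Int) - 1 = ((k : Nat) : Int) := by ring
    rw [e1, e2, PySem.List.pyGetD_natCast, PySem.List.pyGetD_natCast]
    have g1 : A.getD (k + hh) 0 = A[k + hh] := by
      rw [List.getD_eq_getElem?_getD, List.getElem?_eq_getElem hk1]; rfl
    have g2 : A.getD k 0 = A[k] := by
      rw [List.getD_eq_getElem?_getD, List.getElem?_eq_getElem hk2]; rfl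
    rw [g1, g2]
    have hs : pref A (k + hh) - pref A k + A[k + hh] - A[k]
        = pref A ((1 + k) + hh) - pref A (1 + k) := by
      have c1 : (1 + k) + hh = (k + hh) + 1 := by omega
      have c2 : 1 + k = k + 1 := by omega
      rw [c1, c2, pref_succ A (k + hh) hk1, pref_succ A k hk2]; ring
    simp only [hs]
    refine Prod.ext ?_ ?_
    · show (if pref A ((1 + k) + hh) - pref A (1 + k) > _ then _ else _) = max _ _
      by_cases hgt : pref A ((1 + k) + hh) - pref A (1 + k) >
        (List.range k).foldl (fun res t => max res (pref A ((1 + t) + hh) - pref A (1 + t))) r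
      · rw [if_pos hgt, max_eq_right (le_of_lt hgt)]
      · rw [if_neg hgt, max_eq_left (not_lt.mp hgt)]
    · show pref A ((1 + k) + hh) - pref A (1 + k) = pref A ((k + 1) + hh) - pref A (k + 1)
      have c : (1 + k) = (k + 1) := by omega
      rw [c]

-- ===== VERDICT (by name: the statement is the Claim_ definition above) =====
theorem solve_spec : Claim_equal_solve := by
  intro N A _ hpre
  unfold Pre_solve at hpre
  simp only [Spec_solve, solve, solve_alt]
  by_cases hN : N ≤ 0
  · rw [if_pos hN]
    rw [PySem.List.pyRange_one_eq_nil (by omega : N + 1 ≤ 1),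
        PySem.List.pyRange_one_eq_nil (by omega : N ≤ 0)]
    simp
  · rw [if_neg hN]
    have hN' : 0 < N := by omega
    obtain ⟨n, rfl⟩ : ∃ n : Nat, N = (n : Int) := ⟨N.toNat, by omega⟩
    have hn1 : 1 ≤ n := by exact_mod_cast hN'
    have hlen : n ≤ A.length := by exact_mod_cast hpre
    have ht : ((n : Int) + 1).toNat = n + 1 := by omega
    rw [ht, bfold A n n le_rfl hlen]
    simp only [Nat.sub_self, List.replicate_zero, List.append_nil]
    have hfd : PySem.Int.floordiv ((n : Int) + 1) 2 = (((n + 1) / 2 : Nat) : Int) := by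
      rw [PySem.Int.floordiv_eq_ediv_of_pos (by omega : (0:Int) < 2)]
      omega
    rw [hfd]
    set hh := (n + 1) / 2 with hhdef
    have hh1 : 1 ≤ hh := by omega
    have hhle : hh ≤ n := by omega
    -- LHS: guarded scan over all starts, indexed in the prefix-sum array
    rw [PySem.List.pyRange_one 0 (n : Int), show ((n : Int) - 0).toNat = n by omega,
        List.foldl_map]
    have hmain : (List.range n).foldl
        (fun x (y : Nat) => if 0 + (y : Int) + (hh : Int) ≤ (n : Int)
          then max x (PySem.List.pyGetD ((List.range (n + 1)).map (pref A)) (0 + (y : Int) + (hh : Int)) 0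
                    - PySem.List.pyGetD ((List.range (n + 1)).map (pref A)) (0 + (y : Int)) 0)
          else x) 0
      = (List.range n).foldl
        (fun res (t : Nat) => if (t : Int) + (hh : Int) ≤ (n : Int)
          then max res (pref A (t + hh) - pref A t) else res) 0 := by
      refine PySem.List.foldl_congr_mem _ _ _ _ ?_
      intro acc t ht'
      have htn : t < n := List.mem_range.mp ht'
      simp only [zero_add]
      by_cases hcond : (t : Int) + (hh : Int) ≤ (n : Int)
      · rw [if_pos hcond, if_pos hcond]
        have htle : t + hh ≤ n := by omega
        have e3 : (t : Int) + (hh : Int) = ((t + hh : Nat) : Int) := by push_cast; ring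
        rw [e3, PySem.List.pyGetD_natCast, PySem.List.pyGetD_natCast]
        rw [List.getD_eq_getElem?_getD, List.getD_eq_getElem?_getD,
            List.getElem?_map, List.getElem?_map,
            List.getElem?_range (by omega : t + hh < n + 1),
            List.getElem?_range (by omega : t < n + 1)]
        rfl
      · rw [if_neg hcond, if_neg hcond]
    rw [hmain]
    rw [afold A n hh hh1 hhle]
    -- RHS: sliding window
    rw [PySem.List.slice_zero_start, PySem.List.slice_to_natCast]
    have hs0 : (A.take hh).sum = pref A hh := rfl
    rw [hs0]
    have hb1 : (n : Int) - ((hh : Nat) : Int) + 1 = ((n - hh : Nat) : Int) + 1 := by omega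
    rw [hb1, PySem.List.pyRange_one 1 (((n - hh : Nat) : Int) + 1),
        show ((((n - hh : Nat) : Int) + 1) - 1).toNat = n - hh by omega, List.foldl_map]
    rw [bloop A hh (n - hh) (by omega) (max 0 (pref A hh))]
    -- LHS unguarded scan: peel off the first start
    rw [show List.range (n - hh + 1) = List.range 1 ++ (List.range (n - hh)).map (1 + ·)
        by rw [← List.range_add]; congr 1; omega]
    rw [List.foldl_append, List.foldl_map]
    simp [pref_zero]
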